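-- pv_equiv track=rewrite | github.com/chunkhound/chunkhound | chunkhound/api/cli/commands/snapshot.py | _collapse_scope_roots
-- ===== SOURCE A (Python) =====
-- def _collapse_scope_roots(scope_roots: list[str]) -> list[str]:
--     cleaned: list[str] = []
--     for root in scope_roots:
--         normalized = str(root or ".").replace("\\", "/").strip("/") or "."
--         if normalized not in cleaned:
--             cleaned.append(normalized)
--
--     cleaned.sort()
--     collapsed: list[str] = []
--     for root in cleaned:
--         if root == ".":
--             return ["."]
--         if any(root == parent or root.startswith(parent + "/") for parent in collapsed):
--             continue
--         collapsed.append(root)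
--     return collapsed
-- ===== SOURCE B (Python) =====
-- def _collapse_scope_roots(scope_roots):
--     cleaned = {str(r or ".").replace("\\", "/").strip("/") or "." for r in scope_roots}
--     if "." in cleaned:
--         return ["."]
--     keep = set()
--     out = []
--     for root in sorted(cleaned):
--         if not any(ch == "/" and root[:i] in keep for i, ch in enumerate(root)):
--             keep.add(root)
--             out.append(root)
--     return out
-- ===== Notes on version B (the rewrite author's own statement) =====
-- stated objective: faster
-- what changed: B deduplicates via a set instead of 'not in' scans over a growing list, detects the current-directory root by a single set-membership test, and decides whether a sorted root is nested by hash-set lookups of its slash-boundary prefixes instead of scanning all retained roots with startswith.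
import Mathlib
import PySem

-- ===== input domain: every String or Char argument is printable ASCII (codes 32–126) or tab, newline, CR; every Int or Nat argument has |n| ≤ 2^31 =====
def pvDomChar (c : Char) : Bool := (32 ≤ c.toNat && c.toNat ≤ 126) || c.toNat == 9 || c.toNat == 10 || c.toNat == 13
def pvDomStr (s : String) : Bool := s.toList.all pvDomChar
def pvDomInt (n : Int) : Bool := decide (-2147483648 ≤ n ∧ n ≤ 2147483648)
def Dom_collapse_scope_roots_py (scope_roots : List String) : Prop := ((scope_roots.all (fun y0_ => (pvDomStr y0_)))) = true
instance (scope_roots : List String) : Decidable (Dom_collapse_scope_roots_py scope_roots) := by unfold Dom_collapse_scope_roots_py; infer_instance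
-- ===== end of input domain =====

-- B deduplicates via a set and replaces A's scan of all retained roots by a hash-set lookup of each
-- "/"-boundary prefix of the current root (objective: faster, asymptotically fewer comparisons).

-- ===== PORT A =====
-- normalized = str(root or ".").replace("\\", "/").strip("/") or "."
def pvNormA (root : String) : String :=
  let s := PySem.Str.stripChars (PySem.Str.replace (if root = "" then "." else root) "\\" "/") "/"
  if s = "" then "." else s

-- second loop of A, with its early 'return ["."]'
def pvLoopA : List String → List String → List String
  | [], collapsed => collapsed
  | root :: rest, collapsed =>
    if root = "." then ["."]
    else if collapsed.any (fun parent => root == parent || PySem.Str.startswith root (parent ++ "/")) then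
      pvLoopA rest collapsed
    else
      pvLoopA rest (collapsed ++ [root])

def collapse_scope_roots_py (scope_roots : List String) : List String :=
  let cleaned := scope_roots.foldl
    (fun cleaned root =>
      let normalized := pvNormA root
      if cleaned.contains normalized then cleaned else cleaned ++ [normalized]) []
  pvLoopA (PySem.List.sorted cleaned (fun x => x) false) []

-- ===== PORT B =====
def pvNormB (r : String) : String :=
  let s := PySem.Str.stripChars (PySem.Str.replace (if r = "" then "." else r) "\\" "/") "/"
  if s = "" then "." else s

-- any(ch == "/" and root[:i] in keep for i, ch in enumerate(root));
-- root[:i] with 0 ≤ i ≤ len(root) is exactly the first i characters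
def pvHasKeptAncestor (keep : PySem.Set String) (root : String) : Bool :=
  (PySem.List.enumerate root.toList 0).any
    (fun p => p.2 == '/' && PySem.Set.contains keep (String.ofList (root.toList.take p.1.toNat)))

def pvLoopB : List String → PySem.Set String → List String → List String
  | [], _, out => out
  | root :: rest, keep, out =>
    if pvHasKeptAncestor keep root then pvLoopB rest keep out
    else pvLoopB rest (PySem.Set.add keep root) (out ++ [root])

def collapse_scope_roots_py_alt (scope_roots : List String) : List String :=
  let cleaned := PySem.Set.ofList (scope_roots.map pvNormB)
  if PySem.Set.contains cleaned "." then ["."]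
  else pvLoopB (PySem.List.sorted cleaned (fun x => x) false) PySem.Set.empty []

-- ===== PRECONDITION & SPEC =====
def Spec_collapse_scope_roots_py (scope_roots : List String) (out : List String) : Prop := out = collapse_scope_roots_py_alt scope_roots
instance (scope_roots : List String) (out : List String) : Decidable (Spec_collapse_scope_roots_py scope_roots out) := by unfold Spec_collapse_scope_roots_py; infer_instance

-- ===== CLAIM (what is proved, stated in full; the proofs are below) =====
def Claim_equal_collapse_scope_roots_py : Prop := ∀ (scope_roots : List String), Dom_collapse_scope_roots_py scope_roots → Spec_collapse_scope_roots_py scope_roots (collapse_scope_roots_py scope_roots)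

-- ===== LEMMAS AND PROOFS =====

-- A's first loop (ordered dedup of the normalized roots) builds exactly set-of-list of the normalized roots
lemma pv_dedup_eq (xs : List String) :
    xs.foldl (fun cleaned root =>
      let normalized := pvNormA root
      if cleaned.contains normalized then cleaned else cleaned ++ [normalized]) [] =
    PySem.Set.ofList (xs.map pvNormB) := by
  have h : pvNormA = pvNormB := rfl
  simp [PySem.Set.ofList_eq_foldl, List.foldl_map, PySem.Set.add, PySem.Set.contains, h]

-- A's early return: as soon as "." is in the (remaining) list the result is ["."]
lemma pv_loopA_dot : ∀ (l acc : List String), "." ∈ l → pvLoopA l acc = ["."] := by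
  intro l
  induction l with
  | nil => intro acc h; cases h
  | cons root rest ih =>
    intro acc h
    by_cases hd : root = "."
    · simp [pvLoopA, hd]
    · have hr : "." ∈ rest := by
        rcases List.mem_cons.mp h with h1 | h1
        · exact absurd h1.symm hd
        · exact h1
      simp only [pvLoopA, if_neg hd]
      split <;> exact ih _ hr

-- snoc-prefix characterization: q ++ [c] is a prefix of cs iff cs takes q then c
lemma pv_prefix_snoc_iff (q cs : List Char) (c : Char) :
    (q ++ [c]) <+: cs ↔ q.length < cs.length ∧ cs.take q.length = q ∧ cs[q.length]? = some c := by
  constructor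
  · intro h
    have hlt : q.length < cs.length := by
      have := h.length_le; simp at this; omega
    have heq : q ++ [c] = cs.take (q.length + 1) := by
      simpa using List.prefix_iff_eq_take.mp h
    have htake : cs.take (q.length + 1) = cs.take q.length ++ [cs[q.length]] := by
      rw [List.take_add_one, List.getElem?_eq_getElem hlt]; rfl
    rw [htake] at heq
    have hl : (cs.take q.length).length = q.length := by
      simp [List.length_take, Nat.le_of_lt hlt]
    obtain ⟨h1, h2⟩ := List.append_inj heq.symm hl
    refine ⟨hlt, h1, ?_⟩
    rw [List.getElem?_eq_getElem hlt]
    simpa using h2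
  · rintro ⟨hlt, h1, h2⟩
    rw [List.prefix_iff_eq_take]
    simp only [List.length_append, List.length_cons, List.length_nil]
    rw [List.take_add_one, h1, h2]
    rfl

-- the two skip tests agree when root itself is not among the retained roots
lemma pv_cond_eq (acc : List String) (root : String) (hroot : root ∉ acc) :
    acc.any (fun parent => root == parent || PySem.Str.startswith root (parent ++ "/")) =
    pvHasKeptAncestor acc root := by
  apply Bool.eq_iff_iff.mpr
  simp only [pvHasKeptAncestor, List.any_eq_true, Bool.or_eq_true, beq_iff_eq,
    Bool.and_eq_true]
  constructor
  · rintro ⟨p, hp, hcase⟩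
    rcases hcase with h1 | h1
    · exact absurd (h1 ▸ hp) hroot
    · have hpre : (p.toList ++ ['/']) <+: root.toList := by
        have := (PySem.Chars.startswith_iff (s := root.toList) (p := (p ++ "/").toList)).mp (by simpa using h1)
        simpa using this
      obtain ⟨hlt, htake, hget⟩ := (pv_prefix_snoc_iff _ _ _).mp hpre
      have hg : root.toList[p.toList.length] = '/' := by
        rw [List.getElem?_eq_getElem hlt, Option.some_inj] at hget; exact hget
      refine ⟨((p.toList.length : Int), '/'), ?_, rfl, ?_⟩
      · rw [PySem.List.mem_enumerate_iff]
        refine ⟨p.toList.length, hlt, ?_⟩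
        rw [hg]; simp
      · have h0 : ((p.toList.length : Int)).toNat = p.toList.length := by simp
        rw [h0, htake]
        exact (PySem.Set.contains_iff _ _).mpr (by simpa using hp)
  · rintro ⟨q, hq, hch, hmem⟩
    rw [PySem.List.mem_enumerate_iff] at hq
    obtain ⟨k, hk, hqe⟩ := hq
    subst hqe
    simp only [zero_add, Int.toNat_natCast] at hch hmem
    have hmem' : String.ofList (root.toList.take k) ∈ acc := (PySem.Set.contains_iff _ _).mp hmem
    refine ⟨String.ofList (root.toList.take k), hmem', Or.inr ?_⟩
    rw [PySem.Str.startswith_eq, PySem.Chars.startswith_iff]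
    have hl : (root.toList.take k).length = k := by rw [List.length_take]; omega
    have hpre : ((root.toList.take k) ++ ['/']) <+: root.toList := by
      rw [pv_prefix_snoc_iff, hl]
      exact ⟨hk, rfl, by rw [List.getElem?_eq_getElem hk, hch]⟩
    simpa using hpre

-- the two collapse loops agree on a duplicate-free list without "." when keep mirrors the output
lemma pv_loop_eq : ∀ (l acc : List String), "." ∉ l → (∀ r ∈ l, r ∉ acc) → l.Nodup →
    pvLoopA l acc = pvLoopB l acc acc := by
  intro l
  induction l with
  | nil => intro acc _ _ _; rfl
  | cons root rest ih =>
    intro acc hdot hfresh hnd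
    have hdr : root ≠ "." := fun h => hdot (h ▸ List.mem_cons_self ..)
    have hra : root ∉ acc := hfresh root (List.mem_cons_self ..)
    simp only [pvLoopA, pvLoopB, if_neg hdr, pv_cond_eq acc root hra]
    have hdot' : "." ∉ rest := fun h => hdot (List.mem_cons_of_mem _ h)
    have hnd' : rest.Nodup := (List.nodup_cons.mp hnd).2
    split
    · exact ih acc hdot' (fun r hr => hfresh r (List.mem_cons_of_mem _ hr)) hnd'
    · have hadd : PySem.Set.add acc root = acc ++ [root] := by
        simp [PySem.Set.add, PySem.Set.contains, hra]
      rw [hadd]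
      apply ih _ hdot' _ hnd'
      intro r hr
      simp only [List.mem_append, List.mem_singleton]
      rintro (h | h)
      · exact hfresh r (List.mem_cons_of_mem _ hr) h
      · exact (List.nodup_cons.mp hnd).1 (h ▸ hr)

-- ===== VERDICT (by name: the statement is the Claim_ definition above) =====
theorem collapse_scope_roots_py_spec : Claim_equal_collapse_scope_roots_py := by
  intro xs _
  unfold Spec_collapse_scope_roots_py collapse_scope_roots_py collapse_scope_roots_py_alt
  simp only []
  rw [pv_dedup_eq]
  set c := PySem.Set.ofList (xs.map pvNormB) with hc
  have hperm := PySem.List.sorted_perm c (fun x => x) false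
  by_cases hdot : "." ∈ c
  · rw [if_pos ((PySem.Set.contains_iff _ _).mpr hdot)]
    exact pv_loopA_dot _ _ (hperm.mem_iff.mpr hdot)
  · rw [if_neg (fun h => hdot ((PySem.Set.contains_iff _ _).mp h))]
    have hnd : (PySem.List.sorted c (fun x => x) false).Nodup :=
      hperm.nodup_iff.mpr (PySem.Set.nodup_ofList (xs.map pvNormB))
    exact pv_loop_eq _ [] (fun h => hdot (hperm.mem_iff.mp h)) (by simp) hnd
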